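-- pv_equiv track=rewrite | github.com/kinghusnain/advent-of-code | 2022/day23.py | part2
-- ===== SOURCE A (Python) =====
-- from collections import namedtuple
-- from collections.abc import Callable, Iterable
--
-- Point = namedtuple("Point", ["x", "y"])
--
-- def part2(problem_input: Iterable[str]) -> int:
--     """Solution to part 2.
--
--     >>> part2(sample_input)
--     20
--     """
--     elf_positions: set[Point] = set()
--     y = 0
--     for row in problem_input:
--         for x in range(len(row)):
--             if row[x] == "#":
--                 elf_positions.add(Point(x, y))
--         y -= 1
--
--     directions = [Point(0, 1), Point(0, -1), Point(-1, 0), Point(1, 0)]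
--     round = 0
--     while True:
--         round += 1
--
--         proposed_moves: dict[Point, Point] = {}
--         for e in elf_positions:
--             if (
--                 set(
--                     [
--                         Point(e.x - 1, e.y + 1),
--                         Point(e.x, e.y + 1),
--                         Point(e.x + 1, e.y + 1),
--                         Point(e.x - 1, e.y),
--                         Point(e.x + 1, e.y),
--                         Point(e.x - 1, e.y - 1),
--                         Point(e.x, e.y - 1),
--                         Point(e.x + 1, e.y - 1),
--                     ]
--                 )
--                 & elf_positions
--                 == set()
--             ):
--                 continue
--             for d in directions:
--                 if d.x == 0:
--                     to_examine = set(Point(e.x + dx, e.y + d.y) for dx in [-1, 0, 1])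
--                     if elf_positions & to_examine == set():
--                         proposed_moves[e] = Point(e.x + d.x, e.y + d.y)
--                         break
--                 else:
--                     to_examine = set(Point(e.x + d.x, e.y + dy) for dy in [-1, 0, 1])
--                     if elf_positions & to_examine == set():
--                         proposed_moves[e] = Point(e.x + d.x, e.y + d.y)
--                         break
--         new_positions: set[Point] = set()
--         for e in elf_positions:
--             if (
--                 e in proposed_moves
--                 and len(
--                     [
--                         dest
--                         for dest in proposed_moves.values()
--                         if dest == proposed_moves[e]
--                     ]
--                 )
--                 == 1
--             ):
--                 new_positions.add(proposed_moves[e])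
--             else:
--                 new_positions.add(e)
--         if elf_positions == new_positions:
--             break
--         else:
--             elf_positions = new_positions
--             directions = directions[1:] + [directions[0]]
--
--     return round
-- ===== SOURCE B (Python) =====
-- from collections import Counter
--
--
-- def part2(problem_input):
--     # Parse: elf positions as (x, y), y decreasing downward (like A).
--     elves = {(x, -y) for y, row in enumerate(problem_input)
--              for x, c in enumerate(row) if c == "#"}
--     order = [(0, 1), (0, -1), (-1, 0), (1, 0)]
--     rnd = 0
--     while True:
--         rnd += 1
--         # Set-algebraic round: an elf is crowded iff it lies in one of the 8
--         # shifted copies of the elf set.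
--         crowded = set()
--         for dx in (-1, 0, 1):
--             for dy in (-1, 0, 1):
--                 if dx or dy:
--                     crowded |= {(x + dx, y + dy) for x, y in elves}
--         pending = elves & crowded
--         # Direction-major: for each direction, the blocked elves are those in
--         # one of 3 shifted copies of the elf set; the rest of `pending`
--         # propose this direction and drop out.
--         prop = {}
--         for dx, dy in order:
--             blocked = set()
--             for k in (-1, 0, 1):
--                 if dy:
--                     blocked |= {(x + k, y - dy) for x, y in elves}
--                 else:
--                     blocked |= {(x - dx, y + k) for x, y in elves}
--             for s in pending - blocked:
--                 prop[s] = (s[0] + dx, s[1] + dy)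
--             pending &= blocked
--         # Winners: proposals with a unique destination; apply them with set
--         # difference/union instead of a per-elf rebuild.
--         counts = Counter(prop.values())
--         winners = [(s, d) for s, d in prop.items() if counts[d] == 1]
--         new = (elves - {s for s, d in winners}) | {d for s, d in winners}
--         if new == elves:
--             return rnd
--         elves = new
--         order = order[1:] + [order[0]]
-- ===== Notes on version B (the rewrite author's own statement) =====
-- stated objective: alternative
-- what changed: B replaces A's per-elf scanning (8-neighbour set literal, inner direction loop with break, and a rescan of proposed_moves.values() for every elf) by a set-algebraic round: the crowded elves are elves intersected with the union of 8 shifted copies of the elf set, each direction's blocked elves are a union of 3 shifted copies subtracted from the still-pending set, collisions are tallied once with a Counter, and the new configuration is built by set difference/union of winners rather than a per-elf rebuild.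
import Mathlib
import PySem

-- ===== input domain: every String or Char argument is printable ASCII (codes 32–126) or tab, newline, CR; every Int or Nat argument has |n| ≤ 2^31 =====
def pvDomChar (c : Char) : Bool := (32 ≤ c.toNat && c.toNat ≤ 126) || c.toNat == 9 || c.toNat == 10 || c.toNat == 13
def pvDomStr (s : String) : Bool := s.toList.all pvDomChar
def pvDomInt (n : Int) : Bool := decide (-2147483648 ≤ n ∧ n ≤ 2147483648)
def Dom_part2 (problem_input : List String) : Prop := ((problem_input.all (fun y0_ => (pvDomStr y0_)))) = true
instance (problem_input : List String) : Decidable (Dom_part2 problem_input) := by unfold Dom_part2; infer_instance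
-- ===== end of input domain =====

-- B replaces A's per-elf scans (8-neighbour set literal, inner direction loop, rescan of
-- proposed_moves.values() per elf) by a set-algebraic round built from shifted copies of the
-- elf set, a Counter tally and one set difference/union (objective: alternative algorithm).
-- Python's `while True` is ported with a large fuel in BOTH ports; on fuel exhaustion each port
-- returns its current round counter (never reached on the inputs where the Python returns).

-- ===== PORT A =====

-- A's inner `for d in directions: … break` loop for one elf
def pvDirLoopA (elves : PySem.Set (Int × Int)) (dirs : List (Int × Int)) (e : Int × Int) :
    Option (Int × Int) :=
  match dirs with
  | [] => none
  | d :: rest =>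
    if d.1 == 0 then
      if PySem.Set.equal
          (PySem.Set.inter elves
            (PySem.Set.ofList (([-1, 0, 1] : List Int).map (fun dx => (e.1 + dx, e.2 + d.2)))))
          PySem.Set.empty
      then some (e.1 + d.1, e.2 + d.2)
      else pvDirLoopA elves rest e
    else
      if PySem.Set.equal
          (PySem.Set.inter elves
            (PySem.Set.ofList (([-1, 0, 1] : List Int).map (fun dy => (e.1 + d.1, e.2 + dy)))))
          PySem.Set.empty
      then some (e.1 + d.1, e.2 + d.2)
      else pvDirLoopA elves rest e

-- body of A's first per-round loop (one elf of `for e in elf_positions`)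
def pvProposeStepA (elves : PySem.Set (Int × Int)) (dirs : List (Int × Int))
    (pm : PySem.Dict (Int × Int) (Int × Int)) (e : Int × Int) :
    PySem.Dict (Int × Int) (Int × Int) :=
  -- A builds the 8-neighbour set literal inline
  if PySem.Set.equal (PySem.Set.inter (PySem.Set.ofList
      [(e.1 - 1, e.2 + 1), (e.1, e.2 + 1), (e.1 + 1, e.2 + 1), (e.1 - 1, e.2),
        (e.1 + 1, e.2), (e.1 - 1, e.2 - 1), (e.1, e.2 - 1), (e.1 + 1, e.2 - 1)]) elves) PySem.Set.empty
  then pm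
  else match pvDirLoopA elves dirs e with
    | some p => pm.insert e p
    | none => pm

-- A's `proposed_moves` dict (first loop of a round)
def pvProposedA (elves : PySem.Set (Int × Int)) (dirs : List (Int × Int)) :
    PySem.Dict (Int × Int) (Int × Int) :=
  elves.foldl (pvProposeStepA elves dirs) PySem.Dict.empty

-- body of A's second per-round loop (`new_positions.add(…)` for one elf)
def pvMoveStepA (pm : PySem.Dict (Int × Int) (Int × Int))
    (np : PySem.Set (Int × Int)) (e : Int × Int) : PySem.Set (Int × Int) :=
  match pm.get? e with
  | some p =>
    if (pm.values.filter (fun dest => dest == p)).length == 1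
    then PySem.Set.add np p else PySem.Set.add np e
  | none => PySem.Set.add np e

-- A's `new_positions` set (second loop of a round)
def pvNewA (elves : PySem.Set (Int × Int)) (pm : PySem.Dict (Int × Int) (Int × Int)) :
    PySem.Set (Int × Int) :=
  elves.foldl (pvMoveStepA pm) PySem.Set.empty

-- A's `while True` loop (fuel; returns the current round counter on exhaustion)
def pvLoopA (fuel : Nat) (elves : PySem.Set (Int × Int)) (dirs : List (Int × Int))
    (round : Int) : Int :=
  match fuel with
  | 0 => round
  | fuel + 1 =>
    let round := round + 1
    let newPos := pvNewA elves (pvProposedA elves dirs)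
    if PySem.Set.equal elves newPos then round
    else pvLoopA fuel newPos (dirs.drop 1 ++ dirs.take 1) round
      -- `directions[1:] + [directions[0]]`, exact for the (always 4-element) direction list

-- A's parse loop: y starts at 0 and decreases per row; `row[x]` for x in range(len(row))
-- is in range, so pyGetD is exact here
def pvParseA (problem_input : List String) : PySem.Set (Int × Int) :=
  (problem_input.foldl (fun (acc : PySem.Set (Int × Int) × Int) row =>
      ((PySem.List.pyRange 0 row.toList.length 1).foldl
        (fun s x => if PySem.List.pyGetD row.toList x ' ' == '#'
                    then PySem.Set.add s (x, acc.2) else s) acc.1,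
       acc.2 - 1))
    (PySem.Set.empty, 0)).1

def part2 (problem_input : List String) : Int :=
  pvLoopA (2 ^ 62) (pvParseA problem_input) [(0, 1), (0, -1), (-1, 0), (1, 0)] 0

-- ===== PORT B =====

-- `crowded`: the union of the 8 shifted copies of the elf set
def pvCrowdB (elves : PySem.Set (Int × Int)) : PySem.Set (Int × Int) :=
  ([-1, 0, 1] : List Int).foldl (fun c dx =>
    ([-1, 0, 1] : List Int).foldl (fun c dy =>
      if dx != 0 || dy != 0 then
        PySem.Set.union c (elves.map (fun e => (e.1 + dx, e.2 + dy)))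
      else c) c) PySem.Set.empty

-- `blocked` for one direction: a union of 3 shifted copies of the elf set
def pvBlockB (elves : PySem.Set (Int × Int)) (d : Int × Int) : PySem.Set (Int × Int) :=
  ([-1, 0, 1] : List Int).foldl (fun bl k =>
    if d.2 != 0 then PySem.Set.union bl (elves.map (fun e => (e.1 + k, e.2 - d.2)))
    else PySem.Set.union bl (elves.map (fun e => (e.1 - d.1, e.2 + k)))) PySem.Set.empty

-- one direction of B's pass: `pending - blocked` propose this direction, `pending &= blocked`
def pvPassB (elves : PySem.Set (Int × Int))
    (st : PySem.Dict (Int × Int) (Int × Int) × PySem.Set (Int × Int)) (d : Int × Int) :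
    PySem.Dict (Int × Int) (Int × Int) × PySem.Set (Int × Int) :=
  let bl := pvBlockB elves d
  ((PySem.Set.diff st.2 bl).foldl (fun pm s => pm.insert s (s.1 + d.1, s.2 + d.2)) st.1,
   PySem.Set.inter st.2 bl)

-- one round of B: crowded ∩ elves, direction-major passes, Counter tally, set diff/union
def pvStepB (elves : PySem.Set (Int × Int)) (order : List (Int × Int)) :
    PySem.Set (Int × Int) :=
  let pending := PySem.Set.inter elves (pvCrowdB elves)
  let prop := (order.foldl (pvPassB elves) (PySem.Dict.empty, pending)).1
  let counts := PySem.Dict.counter prop.values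
  let winners := prop.items.filter (fun sd => counts.getD sd.2 0 == 1)
  PySem.Set.union (PySem.Set.diff elves (winners.map Prod.fst)) (winners.map Prod.snd)

def pvLoopB (fuel : Nat) (elves : PySem.Set (Int × Int)) (order : List (Int × Int))
    (rnd : Int) : Int :=
  match fuel with
  | 0 => rnd
  | fuel + 1 =>
    let rnd := rnd + 1
    let newPos := pvStepB elves order
    if PySem.Set.equal newPos elves then rnd
    else pvLoopB fuel newPos (order.drop 1 ++ order.take 1) rnd

-- B's parse: one set comprehension (row-major generator, first occurrences)
def part2_alt (problem_input : List String) : Int :=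
  pvLoopB (2 ^ 62)
    (PySem.Set.ofList ((PySem.List.enumerate problem_input 0).flatMap (fun yr =>
        ((PySem.List.enumerate yr.2.toList 0).filter (fun xc => xc.2 == '#')).map
          (fun xc => (xc.1, -yr.1)))))
    [(0, 1), (0, -1), (-1, 0), (1, 0)] 0

-- ===== PRECONDITION & SPEC =====
def Spec_part2 (problem_input : List String) (out : Int) : Prop := out = part2_alt problem_input
instance (problem_input : List String) (out : Int) : Decidable (Spec_part2 problem_input out) := by unfold Spec_part2; infer_instance

-- ===== CLAIM (what is proved, stated in full; the proofs are below) =====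
def Claim_equal_part2 : Prop := ∀ (problem_input : List String), Dom_part2 problem_input → Spec_part2 problem_input (part2 problem_input)

-- ===== LEMMAS AND PROOFS =====

-- shared proof vocabulary: neighbourhood, clearness, first-fit proposal, its count, the move
def pvNeighB (e : Int × Int) : List (Int × Int) :=
  [(e.1 - 1, e.2 + 1), (e.1, e.2 + 1), (e.1 + 1, e.2 + 1), (e.1 - 1, e.2),
   (e.1 + 1, e.2), (e.1 - 1, e.2 - 1), (e.1, e.2 - 1), (e.1 + 1, e.2 - 1)]

def pvClearB (elves : PySem.Set (Int × Int)) (d : Int × Int) (e : Int × Int) : Bool :=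
  if d.2 != 0 then
    ([-1, 0, 1] : List Int).all (fun k => !(PySem.Set.contains elves (e.1 + k, e.2 + d.2)))
  else
    ([-1, 0, 1] : List Int).all (fun k => !(PySem.Set.contains elves (e.1 + d.1, e.2 + k)))

def pvFirst (elves : PySem.Set (Int × Int)) (dirs : List (Int × Int)) (e : Int × Int) :
    Option (Int × Int) :=
  match dirs with
  | [] => none
  | d :: rest => if pvClearB elves d e then some (e.1 + d.1, e.2 + d.2) else pvFirst elves rest e

def pvHasNb (elves : PySem.Set (Int × Int)) (e : Int × Int) : Bool :=
  (pvNeighB e).any (fun n => PySem.Set.contains elves n)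

def pvProp (elves : PySem.Set (Int × Int)) (dirs : List (Int × Int)) (e : Int × Int) :
    Option (Int × Int) :=
  if pvHasNb elves e then pvFirst elves dirs e else none

-- "insert if g produces a value" fold body, named so that lemmas can mention it
def pvOptIns (g : (Int × Int) → Option (Int × Int))
    (pm : PySem.Dict (Int × Int) (Int × Int)) (e : Int × Int) :
    PySem.Dict (Int × Int) (Int × Int) :=
  match g e with
  | some p => pm.insert e p
  | none => pm

-- the canonical per-round proposal association list
def pvPairs (elves : PySem.Set (Int × Int)) (dirs : List (Int × Int)) :
    List ((Int × Int) × (Int × Int)) :=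
  elves.filterMap (fun e => (pvProp elves dirs e).map (fun p => (e, p)))

-- how many elves propose destination p
def pvCnt (elves : PySem.Set (Int × Int)) (dirs : List (Int × Int)) (p : Int × Int) : Nat :=
  (elves.filter (fun e => pvProp elves dirs e == some p)).length

-- where elf e actually moves (none = stays)
def pvMove (elves : PySem.Set (Int × Int)) (dirs : List (Int × Int)) (e : Int × Int) :
    Option (Int × Int) :=
  match pvProp elves dirs e with
  | some p => if pvCnt elves dirs p = 1 then some p else none
  | none => none

-- B's `prop` dict after all direction passes
def pvPropB (elves : PySem.Set (Int × Int)) (order : List (Int × Int)) :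
    PySem.Dict (Int × Int) (Int × Int) :=
  (order.foldl (pvPassB elves) (PySem.Dict.empty, PySem.Set.inter elves (pvCrowdB elves))).1

-- `s & set(cells) == set()` is "no cell is in s"
theorem pv_examine_eq {P : Type} [BEq P] [LawfulBEq P] (elves : PySem.Set P) (cells : List P) :
    PySem.Set.equal (PySem.Set.inter elves (PySem.Set.ofList cells)) PySem.Set.empty
      = cells.all (fun p => !(PySem.Set.contains elves p)) := by
  rw [Bool.eq_iff_iff]
  simp [PySem.Set.equal_iff, PySem.Set.mem_inter, PySem.Set.empty, PySem.Set.mem_ofList,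
    List.all_eq_true]
  try tauto

theorem pv_examine_eq' {P : Type} [BEq P] [LawfulBEq P] (elves : PySem.Set P) (cells : List P) :
    PySem.Set.equal (PySem.Set.inter (PySem.Set.ofList cells) elves) PySem.Set.empty
      = cells.all (fun p => !(PySem.Set.contains elves p)) := by
  rw [Bool.eq_iff_iff]
  simp [PySem.Set.equal_iff, PySem.Set.mem_inter, PySem.Set.empty, PySem.Set.mem_ofList,
    List.all_eq_true]
  try tauto

theorem pv_equal_comm {P : Type} [BEq P] [LawfulBEq P] (s t : PySem.Set P) :
    PySem.Set.equal s t = PySem.Set.equal t s := by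
  rw [Bool.eq_iff_iff]
  simp only [PySem.Set.equal_iff]
  exact ⟨fun h x => (h x).symm, fun h x => (h x).symm⟩

theorem pv_guard_eq (elves : PySem.Set (Int × Int)) (e : Int × Int) :
    PySem.Set.equal (PySem.Set.inter (PySem.Set.ofList
        [(e.1 - 1, e.2 + 1), (e.1, e.2 + 1), (e.1 + 1, e.2 + 1), (e.1 - 1, e.2),
        (e.1 + 1, e.2), (e.1 - 1, e.2 - 1), (e.1, e.2 - 1), (e.1 + 1, e.2 - 1)]) elves) PySem.Set.empty
      = !(pvHasNb elves e) := by
  rw [pv_examine_eq', Bool.eq_iff_iff]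
  simp [pvHasNb, pvNeighB]

theorem pv_dirLoopA_eq (elves : PySem.Set (Int × Int)) (dirs : List (Int × Int))
    (e : Int × Int) (hd : ∀ d ∈ dirs, (d.1 = 0 ↔ d.2 ≠ 0)) :
    pvDirLoopA elves dirs e = pvFirst elves dirs e := by
  induction dirs with
  | nil => rfl
  | cons d rest ih =>
    have hd' : ∀ d' ∈ rest, (d'.1 = 0 ↔ d'.2 ≠ 0) := fun d' h => hd d' (List.mem_cons_of_mem _ h)
    have hdd := hd d (List.mem_cons_self ..)
    simp only [pvDirLoopA, pvFirst, pvClearB, pv_examine_eq, List.all_map]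
    by_cases h1 : d.1 = 0
    · have h2 : d.2 ≠ 0 := hdd.mp h1
      simp [h1, h2, ih hd', Function.comp]
    · have h2 : d.2 = 0 := by by_contra h; exact h1 (hdd.mpr h)
      simp [h1, h2, ih hd', Function.comp]

-- a fold that optionally inserts a fresh key per element appends the produced pairs
theorem pv_items_foldl_optIns (g : (Int × Int) → Option (Int × Int))
    (l : List (Int × Int)) (pm : PySem.Dict (Int × Int) (Int × Int))
    (hf : ∀ a ∈ l, pm.contains a = false) (hnd : l.Nodup) :
    (l.foldl (pvOptIns g) pm).items
      = pm.items ++ l.filterMap (fun e => (g e).map (fun p => (e, p))) := by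
  induction l generalizing pm with
  | nil => simp
  | cons e l ih =>
    have hc : pm.contains e = false := hf e (List.mem_cons_self ..)
    have hen : e ∉ l := (List.nodup_cons.mp hnd).1
    simp only [List.foldl_cons, List.filterMap_cons]
    cases hg : g e with
    | none =>
      have hstep : pvOptIns g pm e = pm := by simp [pvOptIns, hg]
      rw [hstep, ih pm (fun a ha => hf a (List.mem_cons_of_mem _ ha)) (List.nodup_cons.mp hnd).2]
      simp [hg]
    | some p =>
      have hstep : pvOptIns g pm e = pm.insert e p := by simp [pvOptIns, hg]
      rw [hstep, ih (pm.insert e p) ?_ (List.nodup_cons.mp hnd).2]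
      · rw [PySem.Dict.items_insert_of_not_contains _ _ hc]
        simp [hg]
      · intro a ha
        rw [PySem.Dict.contains_insert]
        have : (a == e) = false := by
          simp only [beq_eq_false_iff_ne]; rintro rfl; exact hen ha
        rw [this, hf a (List.mem_cons_of_mem _ ha)]
        rfl

theorem pv_itemsA (elves : PySem.Set (Int × Int)) (dirs : List (Int × Int))
    (hn : elves.Nodup) (hd : ∀ d ∈ dirs, (d.1 = 0 ↔ d.2 ≠ 0)) :
    (pvProposedA elves dirs).items = pvPairs elves dirs := by
  have hbody : ∀ (pm : PySem.Dict (Int × Int) (Int × Int)) (e : Int × Int), e ∈ elves →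
      pvProposeStepA elves dirs pm e = pvOptIns (pvProp elves dirs) pm e := by
    intro pm e _
    unfold pvProposeStepA pvOptIns
    rw [pv_guard_eq, pvProp, pv_dirLoopA_eq elves dirs e hd]
    cases hb : pvHasNb elves e <;> cases hf : pvFirst elves dirs e <;> simp [hb, hf]
  unfold pvProposedA pvPairs
  have hfold : List.foldl (pvProposeStepA elves dirs) PySem.Dict.empty elves
      = List.foldl (pvOptIns (pvProp elves dirs)) PySem.Dict.empty elves :=
    PySem.List.foldl_congr_mem elves _ _ _ hbody
  rw [hfold, pv_items_foldl_optIns _ _ _ (fun a _ => PySem.Dict.contains_empty a) hn]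
  simp
  rfl

-- `filterMap (fun e => (h e).map (fun _ => e)) = filter isSome∘h`
theorem pv_filterMap_guard {α β : Type} (l : List α) (h : α → Option β) :
    l.filterMap (fun e => (h e).map (fun _ => e)) = l.filter (fun e => (h e).isSome) := by
  induction l with
  | nil => rfl
  | cons e l ih =>
    cases hh : h e <;> simp [List.filterMap_cons, List.filter_cons, hh, ih]

theorem pv_keysA (elves : PySem.Set (Int × Int)) (dirs : List (Int × Int))
    (hn : elves.Nodup) (hd : ∀ d ∈ dirs, (d.1 = 0 ↔ d.2 ≠ 0)) :
    (pvProposedA elves dirs).keys = elves.filter (fun e => (pvProp elves dirs e).isSome) := by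
  have hkeys : (pvProposedA elves dirs).keys = (pvProposedA elves dirs).items.map Prod.fst := rfl
  rw [hkeys, pv_itemsA elves dirs hn hd]
  unfold pvPairs
  rw [List.map_filterMap]
  simp only [Option.map_map]
  exact pv_filterMap_guard elves (pvProp elves dirs)

theorem pv_getA (elves : PySem.Set (Int × Int)) (dirs : List (Int × Int))
    (hn : elves.Nodup) (hd : ∀ d ∈ dirs, (d.1 = 0 ↔ d.2 ≠ 0)) (e : Int × Int)
    (he : e ∈ elves) :
    (pvProposedA elves dirs).get? e = pvProp elves dirs e := by
  have hk : (pvProposedA elves dirs).keys.Nodup := by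
    rw [pv_keysA elves dirs hn hd]; exact hn.filter _
  cases hp : pvProp elves dirs e with
  | some p =>
    refine PySem.Dict.get?_of_mem_items _ ?_ hk
    rw [pv_itemsA elves dirs hn hd]
    exact List.mem_filterMap.mpr ⟨e, he, by rw [hp]; rfl⟩
  | none =>
    rw [PySem.Dict.get?_eq_none_iff_not_mem_keys]
    rw [pv_keysA elves dirs hn hd]
    intro hmem
    have := (List.mem_filter.mp hmem).2
    rw [hp] at this
    simp at this

-- ===== B-side lemmas =====

-- membership in shifted copies of a set
theorem pv_mem_map_add (s : List (Int × Int)) (a b : Int) (x : Int × Int) :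
    x ∈ s.map (fun e => (e.1 + a, e.2 + b)) ↔ (x.1 - a, x.2 - b) ∈ s := by
  rw [List.mem_map]
  constructor
  · rintro ⟨e, he, hx⟩
    have h1 : x.1 - a = e.1 := by rw [← hx]; simp
    have h2 : x.2 - b = e.2 := by rw [← hx]; simp
    rw [show (x.1 - a, x.2 - b) = e from Prod.ext h1 h2]
    exact he
  · intro h
    exact ⟨(x.1 - a, x.2 - b), h, by simp⟩

theorem pv_mem_crowd (elves : PySem.Set (Int × Int)) (x : Int × Int) :
    x ∈ pvCrowdB elves ↔ pvHasNb elves x = true := by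
  have hred : pvCrowdB elves =
      PySem.Set.union (PySem.Set.union (PySem.Set.union (PySem.Set.union (PySem.Set.union
        (PySem.Set.union (PySem.Set.union (PySem.Set.union PySem.Set.empty
          (elves.map (fun e => (e.1 + -1, e.2 + -1))))
          (elves.map (fun e => (e.1 + -1, e.2 + 0))))
          (elves.map (fun e => (e.1 + -1, e.2 + 1))))
          (elves.map (fun e => (e.1 + 0, e.2 + -1))))
          (elves.map (fun e => (e.1 + 0, e.2 + 1))))
          (elves.map (fun e => (e.1 + 1, e.2 + -1))))
          (elves.map (fun e => (e.1 + 1, e.2 + 0))))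
          (elves.map (fun e => (e.1 + 1, e.2 + 1))) := rfl
  rw [hred]
  simp only [PySem.Set.mem_union, pv_mem_map_add, sub_neg_eq_add, sub_zero,
    pvHasNb, pvNeighB, List.any_cons, List.any_nil, Bool.or_eq_true,
    PySem.Set.contains_iff, PySem.Set.empty, List.not_mem_nil, false_or,
    Bool.false_eq_true, or_false]
  tauto

theorem pv_mem_map_addsub (s : List (Int × Int)) (a b : Int) (x : Int × Int) :
    x ∈ s.map (fun e => (e.1 + a, e.2 - b)) ↔ (x.1 - a, x.2 + b) ∈ s := by
  rw [List.mem_map]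
  constructor
  · rintro ⟨e, he, hx⟩
    have h1 : x.1 - a = e.1 := by rw [← hx]; simp
    have h2 : x.2 + b = e.2 := by rw [← hx]; simp
    rw [show (x.1 - a, x.2 + b) = e from Prod.ext h1 h2]
    exact he
  · intro h
    exact ⟨(x.1 - a, x.2 + b), h, by simp⟩

theorem pv_mem_map_subadd (s : List (Int × Int)) (a b : Int) (x : Int × Int) :
    x ∈ s.map (fun e => (e.1 - a, e.2 + b)) ↔ (x.1 + a, x.2 - b) ∈ s := by
  rw [List.mem_map]
  constructor
  · rintro ⟨e, he, hx⟩
    have h1 : x.1 + a = e.1 := by rw [← hx]; simp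
    have h2 : x.2 - b = e.2 := by rw [← hx]; simp
    rw [show (x.1 + a, x.2 - b) = e from Prod.ext h1 h2]
    exact he
  · intro h
    exact ⟨(x.1 + a, x.2 - b), h, by simp⟩

theorem pv_mem_block (elves : PySem.Set (Int × Int)) (d : Int × Int) (x : Int × Int) :
    x ∈ pvBlockB elves d ↔ pvClearB elves d x = false := by
  by_cases h2 : d.2 = 0
  · have hb : (d.2 != 0) = false := by simp [h2]
    have hred : pvBlockB elves d =
        PySem.Set.union (PySem.Set.union (PySem.Set.union PySem.Set.empty
          (elves.map (fun e => (e.1 - d.1, e.2 + -1))))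
          (elves.map (fun e => (e.1 - d.1, e.2 + 0))))
          (elves.map (fun e => (e.1 - d.1, e.2 + 1))) := by
      unfold pvBlockB
      simp only [List.foldl_cons, List.foldl_nil, hb, Bool.false_eq_true, if_false]
    rw [hred]
    unfold pvClearB
    simp only [hb, Bool.false_eq_true, if_false]
    simp only [PySem.Set.mem_union, pv_mem_map_subadd, PySem.Set.empty,
      List.not_mem_nil, false_or]
    simp only [sub_neg_eq_add, sub_zero, List.all_cons, List.all_nil,
      Bool.and_eq_false_iff, Bool.not_eq_false', PySem.Set.contains_iff,
      Bool.and_true, ← sub_eq_add_neg, add_zero]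
    tauto
  · have hb : (d.2 != 0) = true := by simp [h2]
    have hred : pvBlockB elves d =
        PySem.Set.union (PySem.Set.union (PySem.Set.union PySem.Set.empty
          (elves.map (fun e => (e.1 + -1, e.2 - d.2))))
          (elves.map (fun e => (e.1 + 0, e.2 - d.2))))
          (elves.map (fun e => (e.1 + 1, e.2 - d.2))) := by
      unfold pvBlockB
      simp only [List.foldl_cons, List.foldl_nil, hb, if_true]
    rw [hred]
    unfold pvClearB
    simp only [hb, if_true]
    simp only [PySem.Set.mem_union, pv_mem_map_addsub, PySem.Set.empty,
      List.not_mem_nil, false_or]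
    simp only [sub_neg_eq_add, sub_zero, List.all_cons, List.all_nil,
      Bool.and_eq_false_iff, Bool.not_eq_false', PySem.Set.contains_iff,
      Bool.and_true, ← sub_eq_add_neg, add_zero]
    tauto

theorem pv_contains_block (elves : PySem.Set (Int × Int)) (d : Int × Int) (x : Int × Int) :
    PySem.Set.contains (pvBlockB elves d) x = !(pvClearB elves d x) := by
  rw [Bool.eq_iff_iff, PySem.Set.contains_iff, pv_mem_block]
  cases pvClearB elves d x <;> simp

-- B's pending starts as the crowded elves
theorem pv_pending0 (elves : PySem.Set (Int × Int)) :
    PySem.Set.inter elves (pvCrowdB elves) = elves.filter (fun e => pvHasNb elves e) := by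
  show elves.filter (fun e => PySem.Set.contains (pvCrowdB elves) e) = _
  apply List.filter_congr
  intro e _
  rw [Bool.eq_iff_iff, PySem.Set.contains_iff, pv_mem_crowd]

-- one direction pass of B in filter form
theorem pv_passB_eq (elves : PySem.Set (Int × Int)) (d : Int × Int)
    (pm : PySem.Dict (Int × Int) (Int × Int)) (pend : PySem.Set (Int × Int)) :
    pvPassB elves (pm, pend) d
      = ((pend.filter (fun e => pvClearB elves d e)).foldl
            (fun pm e => pm.insert e (e.1 + d.1, e.2 + d.2)) pm,
         pend.filter (fun e => !(pvClearB elves d e))) := by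
  simp only [pvPassB]
  have hdiff : PySem.Set.diff pend (pvBlockB elves d) = pend.filter (fun e => pvClearB elves d e) := by
    show pend.filter (fun e => !(PySem.Set.contains (pvBlockB elves d) e)) = _
    apply List.filter_congr
    intro e _
    rw [pv_contains_block, Bool.not_not]
  have hint : PySem.Set.inter pend (pvBlockB elves d) = pend.filter (fun e => !(pvClearB elves d e)) := by
    show pend.filter (fun e => PySem.Set.contains (pvBlockB elves d) e) = _
    apply List.filter_congr
    intro e _
    rw [pv_contains_block]
  rw [hdiff, hint]

theorem pv_itemsB_perm (elves : PySem.Set (Int × Int)) (ds : List (Int × Int))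
    (l : List (Int × Int)) (pm : PySem.Dict (Int × Int) (Int × Int))
    (hnd : l.Nodup) (hf : ∀ e ∈ l, pm.contains e = false) :
    (((ds.foldl (pvPassB elves) (pm, l)).1.items : Multiset ((Int × Int) × (Int × Int))))
      = ↑pm.items + ↑(l.filterMap (fun e => (pvFirst elves ds e).map (fun p => (e, p)))) := by
  induction ds generalizing pm l with
  | nil => simp [pvFirst]
  | cons d ds ih =>
    simp only [List.foldl_cons]
    rw [pv_passB_eq]
    have hfresh : ∀ a ∈ l.filter (fun e => pvClearB elves d e), pm.contains a = false :=
      fun a ha => hf a (List.mem_of_mem_filter ha)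
    have hknd : (l.filter (fun e => pvClearB elves d e)).Nodup := hnd.filter _
    have hitems : ((l.filter (fun e => pvClearB elves d e)).foldl
          (fun pm e => pm.insert e (e.1 + d.1, e.2 + d.2)) pm).items
        = pm.items ++ (l.filter (fun e => pvClearB elves d e)).map
            (fun e => (e, (e.1 + d.1, e.2 + d.2))) := by
      have h := PySem.Dict.items_foldl_insert_fresh
        (l := l.filter (fun e => pvClearB elves d e))
        (k := fun e => e) (v := fun e => (e.1 + d.1, e.2 + d.2)) (d := pm)
        (by simpa using hfresh) (by simpa using hknd)
      simpa using h
    rw [ih _ _ (hnd.filter _) ?fresh2]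
    case fresh2 =>
      intro e he
      have hcl : pvClearB elves d e = false := by
        have := (List.mem_filter.mp he).2; simpa using this
      have hel : e ∈ l := List.mem_of_mem_filter he
      have hkeys := PySem.Dict.keys_foldl_insert
        (l := l.filter (fun e => pvClearB elves d e))
        (f := fun _ e => (e.1 + d.1, e.2 + d.2)) (d := pm)
      by_contra hcon
      rw [Bool.not_eq_false] at hcon
      have hmem : e ∈ ((l.filter (fun e => pvClearB elves d e)).foldl
          (fun pm e => pm.insert e (e.1 + d.1, e.2 + d.2)) pm).keys :=
        (PySem.Dict.contains_iff_mem_keys _ _).mp hcon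
      rw [hkeys] at hmem
      rcases (PySem.Set.mem_update _ _ _).mp hmem with hmem | hmem
      · have h1 : pm.contains e = true := (PySem.Dict.contains_iff_mem_keys _ _).mpr hmem
        rw [hf e hel] at h1; exact Bool.false_ne_true h1
      · have h1 := (List.mem_filter.mp hmem).2
        rw [hcl] at h1; exact Bool.false_ne_true h1
    rw [hitems]
    have hsplit : (l.filter (fun e => pvClearB elves d e)
          ++ l.filter (fun e => !(pvClearB elves d e))).Perm l :=
      List.filter_append_perm _ l
    have hperm := hsplit.symm.filterMap
      (fun e => (pvFirst elves (d :: ds) e).map (fun p => (e, p)))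
    have hms : (↑(l.filterMap (fun e => (pvFirst elves (d :: ds) e).map (fun p => (e, p))))
          : Multiset ((Int × Int) × (Int × Int)))
        = ↑((l.filter (fun e => pvClearB elves d e)).filterMap
              (fun e => (pvFirst elves (d :: ds) e).map (fun p => (e, p))))
          + ↑((l.filter (fun e => !(pvClearB elves d e))).filterMap
              (fun e => (pvFirst elves (d :: ds) e).map (fun p => (e, p)))) := by
      have hcat : ∀ (l1 l2 : List ((Int × Int) × (Int × Int))),
          (↑(l1 ++ l2) : Multiset ((Int × Int) × (Int × Int))) = ↑l1 + ↑l2 := by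
        intro l1 l2; simp
      rw [← hcat, Multiset.coe_eq_coe, ← List.filterMap_append]
      exact hperm
    rw [hms]
    have h1 : (l.filter (fun e => pvClearB elves d e)).filterMap
          (fun e => (pvFirst elves (d :: ds) e).map (fun p => (e, p)))
        = (l.filter (fun e => pvClearB elves d e)).map
            (fun e => (e, (e.1 + d.1, e.2 + d.2))) := by
      rw [List.filterMap_eq_map_iff_forall_eq_some.mpr]
      intro e he
      have hc := (List.mem_filter.mp he).2
      simp [pvFirst, hc]
    have h2 : (l.filter (fun e => !(pvClearB elves d e))).filterMap
          (fun e => (pvFirst elves (d :: ds) e).map (fun p => (e, p)))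
        = (l.filter (fun e => !(pvClearB elves d e))).filterMap
            (fun e => (pvFirst elves ds e).map (fun p => (e, p))) := by
      apply List.filterMap_congr
      intro e he
      have hc : pvClearB elves d e = false := by
        have := (List.mem_filter.mp he).2; simpa using this
      simp [pvFirst, hc]
    rw [h1, h2]
    have hcat : ∀ (l1 l2 : List ((Int × Int) × (Int × Int))),
        (↑(l1 ++ l2) : Multiset ((Int × Int) × (Int × Int))) = ↑l1 + ↑l2 := by
      intro l1 l2; simp
    rw [hcat]
    abel

-- generic: filterMap of a guarded option = filterMap over the filtered list
theorem pv_filterMap_ifGuard {α : Type} {β : Type} (l : List α) (q : α → Bool)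
    (h : α → Option β) (f : α → β → α × β) :
    l.filterMap (fun e => ((if q e then h e else none)).map (f e))
      = (l.filter q).filterMap (fun e => (h e).map (f e)) := by
  induction l with
  | nil => rfl
  | cons e l ih =>
    cases hq : q e <;> simp [List.filterMap_cons, List.filter_cons, hq, ih]

theorem pv_itemsB (elves : PySem.Set (Int × Int)) (dirs : List (Int × Int))
    (hn : elves.Nodup) :
    ((pvPropB elves dirs).items : Multiset ((Int × Int) × (Int × Int)))
      = ↑(pvPairs elves dirs) := by
  unfold pvPropB
  rw [pv_pending0, pv_itemsB_perm elves dirs _ PySem.Dict.empty (hn.filter _)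
    (fun e _ => PySem.Dict.contains_empty e)]
  have : pvPairs elves dirs
      = (elves.filter (fun e => pvHasNb elves e)).filterMap
          (fun e => (pvFirst elves dirs e).map (fun p => (e, p))) := by
    unfold pvPairs pvProp
    exact pv_filterMap_ifGuard elves _ _ _
  rw [this]
  rw [show (PySem.Dict.empty : PySem.Dict (Int × Int) (Int × Int)).items = [] from rfl]
  rw [show ((↑([] : List ((Int × Int) × (Int × Int)))) : Multiset ((Int × Int) × (Int × Int))) = 0
    from rfl, zero_add]

theorem pv_itemsB_permA (elves : PySem.Set (Int × Int)) (dirs : List (Int × Int))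
    (hn : elves.Nodup) :
    ((pvPropB elves dirs).items).Perm (pvPairs elves dirs) := by
  rw [← Multiset.coe_eq_coe]
  exact pv_itemsB elves dirs hn

-- membership characterisation of pvPairs
theorem pv_mem_pairs (elves : PySem.Set (Int × Int)) (dirs : List (Int × Int))
    (sd : (Int × Int) × (Int × Int)) :
    sd ∈ pvPairs elves dirs ↔ sd.1 ∈ elves ∧ pvProp elves dirs sd.1 = some sd.2 := by
  unfold pvPairs
  rw [List.mem_filterMap]
  constructor
  · rintro ⟨e, he, hp⟩
    cases hq : pvProp elves dirs e with
    | none => rw [hq] at hp; simp at hp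
    | some p =>
      rw [hq] at hp
      simp only [Option.map_some, Option.some_inj] at hp
      subst hp
      exact ⟨he, hq⟩
  · rintro ⟨h1, h2⟩
    exact ⟨sd.1, h1, by rw [h2]; rfl⟩

-- counting hits of a filterMap
theorem pv_count_filterMap {A B : Type} [BEq B] [LawfulBEq B] (l : List A) (g : A → Option B) (p : B) :
    (l.filterMap g).count p = (l.filter (fun e => g e == some p)).length := by
  induction l with
  | nil => rfl
  | cons e l ih =>
    rw [List.filterMap_cons, List.filter_cons]
    cases hg : g e with
    | none =>
      simp only [hg]
      have hb : ((none : Option B) == some p) = false := rfl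
      simp only [hb, Bool.false_eq_true, if_false, ih]
    | some q =>
      simp only [hg]
      by_cases hq : q = p
      · have hb : (some q == some p) = true := by simp [hq]
        simp [hb, hq, List.count_cons, ih]
      · have hb : (some q == some p) = false := by simp [hq]
        simp [hb, List.count_cons, ih, hq]

-- the multiset of proposed destinations counts pvCnt
theorem pv_count_pairs (elves : PySem.Set (Int × Int)) (dirs : List (Int × Int))
    (p : Int × Int) :
    ((pvPairs elves dirs).map Prod.snd).count p = pvCnt elves dirs p := by
  unfold pvPairs pvCnt
  rw [List.map_filterMap]
  have : (fun e => ((pvProp elves dirs e).map (fun q => (e, q))).map Prod.snd)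
      = fun e => pvProp elves dirs e := by
    funext e
    cases pvProp elves dirs e <;> rfl
  rw [this, pv_count_filterMap]

-- A side: the per-elf values() rescan counts pvCnt
theorem pv_cntA (elves : PySem.Set (Int × Int)) (dirs : List (Int × Int))
    (hn : elves.Nodup) (hd : ∀ d ∈ dirs, (d.1 = 0 ↔ d.2 ≠ 0)) (p : Int × Int) :
    ((pvProposedA elves dirs).values.filter (fun dest => dest == p)).length
      = pvCnt elves dirs p := by
  have hv : (pvProposedA elves dirs).values = (pvPairs elves dirs).map Prod.snd := by
    show (pvProposedA elves dirs).items.map Prod.snd = _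
    rw [pv_itemsA elves dirs hn hd]
  rw [hv, ← pv_count_pairs, List.count_eq_countP, List.countP_eq_length_filter]

-- B side: the Counter counts pvCnt
theorem pv_cntB (elves : PySem.Set (Int × Int)) (dirs : List (Int × Int))
    (hn : elves.Nodup) (p : Int × Int) :
    (PySem.Dict.counter (pvPropB elves dirs).values).getD p 0 = (pvCnt elves dirs p : Int) := by
  rw [PySem.Dict.getD_counter]
  have hv : ((pvPropB elves dirs).values).Perm ((pvPairs elves dirs).map Prod.snd) :=
    (pv_itemsB_permA elves dirs hn).map Prod.snd
  rw [hv.count_eq, pv_count_pairs]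

-- any fold whose step preserves Nodup preserves Nodup
theorem pv_nodup_foldl {a P : Type} [BEq P] [LawfulBEq P]
    (l : List a) (f : PySem.Set P → a → PySem.Set P)
    (h : ∀ s e, s.Nodup → (f s e).Nodup) :
    ∀ s : PySem.Set P, s.Nodup → (l.foldl f s).Nodup := by
  induction l with
  | nil => intro s hs; simpa using hs
  | cons e l ih => intro s hs; exact ih (f s e) (h s e hs)

theorem pv_nodup_newA (elves : PySem.Set (Int × Int))
    (pm : PySem.Dict (Int × Int) (Int × Int)) : (pvNewA elves pm).Nodup := by
  unfold pvNewA
  apply pv_nodup_foldl elves (pvMoveStepA pm) ?_ PySem.Set.empty (by simp [PySem.Set.empty])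
  intro s e hs
  unfold pvMoveStepA
  cases pm.get? e with
  | some p =>
    dsimp only
    split
    · exact PySem.Set.nodup_add _ _ hs
    · exact PySem.Set.nodup_add _ _ hs
  | none => exact PySem.Set.nodup_add _ _ hs

theorem pv_nodup_stepB (elves : PySem.Set (Int × Int)) (order : List (Int × Int))
    (hn : elves.Nodup) : (pvStepB elves order).Nodup := by
  unfold pvStepB
  exact PySem.Set.nodup_union _ _ (PySem.Set.nodup_diff _ _ hn)

-- membership characterisation of A's new set
theorem pv_charA (elves : PySem.Set (Int × Int)) (dirs : List (Int × Int))
    (hn : elves.Nodup) (hd : ∀ d ∈ dirs, (d.1 = 0 ↔ d.2 ≠ 0)) (x : Int × Int) :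
    x ∈ pvNewA elves (pvProposedA elves dirs)
      ↔ ∃ e ∈ elves, (pvMove elves dirs e).getD e = x := by
  unfold pvNewA
  have hfold : List.foldl (pvMoveStepA (pvProposedA elves dirs)) PySem.Set.empty elves
      = List.foldl (fun np e => PySem.Set.add np ((pvMove elves dirs e).getD e))
          PySem.Set.empty elves := by
    apply PySem.List.foldl_congr_mem
    intro np e he
    unfold pvMoveStepA pvMove
    rw [pv_getA elves dirs hn hd e he]
    cases hp : pvProp elves dirs e with
    | none => rfl
    | some p =>
      dsimp only
      rw [pv_cntA elves dirs hn hd p]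
      by_cases h1 : pvCnt elves dirs p = 1
      · rw [if_pos (by simpa using h1), if_pos h1]
        rfl
      · rw [if_neg (by simpa using h1), if_neg h1]
        rfl
  rw [hfold, PySem.Set.mem_foldl_add]
  simp only [PySem.Set.empty, List.not_mem_nil, false_or]
  constructor
  · rintro ⟨e, he, hx⟩
    exact ⟨e, he, hx.symm⟩
  · rintro ⟨e, he, hx⟩
    exact ⟨e, he, hx.symm⟩

-- membership characterisation of B's new set
theorem pv_charB (elves : PySem.Set (Int × Int)) (dirs : List (Int × Int))
    (hn : elves.Nodup) (x : Int × Int) :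
    x ∈ pvStepB elves dirs
      ↔ ∃ e ∈ elves, (pvMove elves dirs e).getD e = x := by
  unfold pvStepB
  have hwin : ∀ sd : (Int × Int) × (Int × Int),
      sd ∈ (pvPropB elves dirs).items.filter
          (fun sd => (PySem.Dict.counter (pvPropB elves dirs).values).getD sd.2 0 == 1)
        ↔ sd.1 ∈ elves ∧ pvMove elves dirs sd.1 = some sd.2 := by
    intro sd
    rw [List.mem_filter, (pv_itemsB_permA elves dirs hn).mem_iff, pv_mem_pairs,
      pv_cntB elves dirs hn sd.2]
    unfold pvMove
    constructor
    · rintro ⟨⟨h1, h2⟩, h3⟩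
      have hc : pvCnt elves dirs sd.2 = 1 := by
        have := beq_iff_eq.mp h3; exact_mod_cast this
      exact ⟨h1, by rw [h2]; simp [hc]⟩
    · rintro ⟨h1, h2⟩
      cases hp : pvProp elves dirs sd.1 with
      | none => rw [hp] at h2; simp at h2
      | some q =>
        rw [hp] at h2
        dsimp only at h2
        by_cases hc : pvCnt elves dirs q = 1
        · rw [if_pos hc] at h2
          have hq : q = sd.2 := by simpa using h2
          subst hq
          exact ⟨⟨h1, rfl⟩, by simp [hc]⟩
        · rw [if_neg hc] at h2; simp at h2
  rw [PySem.Set.mem_union, PySem.Set.mem_diff]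
  simp only [List.mem_map]
  constructor
  · rintro (⟨hx, hnm⟩ | ⟨sd, hsd, hx⟩)
    · refine ⟨x, hx, ?_⟩
      cases hm : pvMove elves dirs x with
      | none => rfl
      | some p =>
        exfalso
        exact hnm ⟨(x, p), (hwin (x, p)).mpr ⟨hx, hm⟩, rfl⟩
    · obtain ⟨h1, h2⟩ := (hwin sd).mp hsd
      exact ⟨sd.1, h1, by rw [h2, ← hx]; rfl⟩
  · rintro ⟨e, he, hx⟩
    cases hm : pvMove elves dirs e with
    | none =>
      rw [hm] at hx
      have hx' : e = x := by simpa using hx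
      left
      refine ⟨by rwa [← hx'], ?_⟩
      rintro ⟨sd, hsd, hfst⟩
      obtain ⟨h1, h2⟩ := (hwin sd).mp hsd
      rw [hfst, ← hx'] at h2
      rw [hm] at h2
      simp at h2
    | some p =>
      rw [hm] at hx
      have hp : p = x := by simpa using hx
      right
      exact ⟨(e, x), (hwin (e, x)).mpr ⟨he, by rw [hm, hp]⟩, rfl⟩

-- pvMove depends on the elf set only through membership
theorem pv_move_eqv (sA sB : PySem.Set (Int × Int)) (dirs : List (Int × Int))
    (hA : sA.Nodup) (hB : sB.Nodup) (hm : ∀ x, x ∈ sA ↔ x ∈ sB) :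
    pvMove sA dirs = pvMove sB dirs := by
  have hperm : sA.Perm sB := (List.perm_ext_iff_of_nodup hA hB).mpr hm
  have hcont : PySem.Set.contains sA = PySem.Set.contains sB := by
    funext x
    rw [Bool.eq_iff_iff, PySem.Set.contains_iff, PySem.Set.contains_iff]
    exact hm x
  have hclear : pvClearB sA = pvClearB sB := by
    funext d e
    unfold pvClearB
    rw [hcont]
  have hfirst : pvFirst sA = pvFirst sB := by
    funext ds e
    induction ds with
    | nil => rfl
    | cons d rest ih => unfold pvFirst; rw [hclear, ih]
  have hprop : pvProp sA dirs = pvProp sB dirs := by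
    funext e
    unfold pvProp pvHasNb
    rw [hcont, hfirst]
  have hcnt : pvCnt sA dirs = pvCnt sB dirs := by
    funext p
    unfold pvCnt
    rw [hprop, (hperm.filter _).length_eq]
  funext e
  unfold pvMove
  rw [hprop, hcnt]

-- the loops agree round for round, modulo membership of the elf sets
theorem pv_loop_eq (fuel : Nat) (sA sB : PySem.Set (Int × Int)) (dirs : List (Int × Int))
    (rnd : Int) (hA : sA.Nodup) (hB : sB.Nodup) (hm : ∀ x, x ∈ sA ↔ x ∈ sB)
    (hd : ∀ d ∈ dirs, (d.1 = 0 ↔ d.2 ≠ 0)) :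
    pvLoopA fuel sA dirs rnd = pvLoopB fuel sB dirs rnd := by
  induction fuel generalizing sA sB dirs rnd with
  | zero => rfl
  | succ fuel ih =>
    simp only [pvLoopA, pvLoopB]
    have hmove := pv_move_eqv sA sB dirs hA hB hm
    have hnew : ∀ x, x ∈ pvNewA sA (pvProposedA sA dirs) ↔ x ∈ pvStepB sB dirs := by
      intro x
      rw [pv_charA sA dirs hA hd x, pv_charB sB dirs hB x, hmove]
      constructor
      · rintro ⟨e, he, hx⟩; exact ⟨e, (hm e).mp he, hx⟩
      · rintro ⟨e, he, hx⟩; exact ⟨e, (hm e).mpr he, hx⟩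
    have hguard : PySem.Set.equal sA (pvNewA sA (pvProposedA sA dirs))
        = PySem.Set.equal (pvStepB sB dirs) sB := by
      rw [pv_equal_comm (pvStepB sB dirs) sB, Bool.eq_iff_iff,
        PySem.Set.equal_iff, PySem.Set.equal_iff]
      constructor
      · intro h x; rw [← hm x, ← hnew x]; exact h x
      · intro h x; rw [hm x, hnew x]; exact h x
    by_cases hstop : PySem.Set.equal sA (pvNewA sA (pvProposedA sA dirs)) = true
    · rw [if_pos hstop, if_pos (hguard ▸ hstop)]
    · rw [if_neg hstop, if_neg (fun h => hstop (hguard ▸ h))]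
      exact ih _ _ _ _ (pv_nodup_newA sA _) (pv_nodup_stepB sB dirs hB) hnew
        (fun d hdm => hd d (by
          rcases List.mem_append.mp hdm with h | h
          · exact List.mem_of_mem_drop h
          · exact List.mem_of_mem_take h))

-- membership through a conditional-add fold
theorem pv_mem_foldl_if_add {a b : Type} [BEq b] [LawfulBEq b] (l : List a)
    (q : a → Bool) (g : a → b) (s : PySem.Set b) (x : b) :
    x ∈ l.foldl (fun s e => if q e then PySem.Set.add s (g e) else s) s
      ↔ x ∈ s ∨ ∃ e ∈ l, q e = true ∧ g e = x := by
  induction l generalizing s with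
  | nil => simp
  | cons e l ih =>
    simp only [List.foldl_cons]
    cases hq : q e with
    | false =>
      rw [if_neg (by simp [hq]), ih]
      constructor
      · rintro (h | h)
        · exact Or.inl h
        · exact Or.inr (by obtain ⟨e', he', h1, h2⟩ := h; exact ⟨e', List.mem_cons_of_mem _ he', h1, h2⟩)
      · rintro (h | ⟨e', he', h1, h2⟩)
        · exact Or.inl h
        · rcases List.mem_cons.mp he' with rfl | he''
          · rw [hq] at h1; exact absurd h1 (by simp)
          · exact Or.inr ⟨e', he'', h1, h2⟩
    | true =>
      rw [if_pos (by simp [hq]), ih]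
      constructor
      · rintro (h | h)
        · rcases (PySem.Set.mem_add _ _ _).mp h with h' | h'
          · exact Or.inl h'
          · exact Or.inr ⟨e, List.mem_cons_self .., hq, h'.symm⟩
        · exact Or.inr (by obtain ⟨e', he', h1, h2⟩ := h; exact ⟨e', List.mem_cons_of_mem _ he', h1, h2⟩)
      · rintro (h | ⟨e', he', h1, h2⟩)
        · exact Or.inl ((PySem.Set.mem_add _ _ _).mpr (Or.inl h))
        · rcases List.mem_cons.mp he' with rfl | he''
          · exact Or.inl ((PySem.Set.mem_add _ _ _).mpr (Or.inr h2.symm))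
          · exact Or.inr ⟨e', he'', h1, h2⟩

-- the two parses agree up to membership
theorem pv_nodup_parse (pi : List String) : (pvParseA pi).Nodup := by
  unfold pvParseA
  have houter : ∀ (acc : PySem.Set (Int × Int) × Int), acc.1.Nodup →
      (pi.foldl (fun (acc : PySem.Set (Int × Int) × Int) row =>
        ((PySem.List.pyRange 0 row.toList.length 1).foldl
          (fun s x => if PySem.List.pyGetD row.toList x ' ' == '#'
                      then PySem.Set.add s (x, acc.2) else s) acc.1,
         acc.2 - 1)) acc).1.Nodup := by
    induction pi with
    | nil => intro acc h; simpa using h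
    | cons row rest ih =>
      intro acc h
      simp only [List.foldl_cons]
      apply ih
      apply pv_nodup_foldl _ _ ?_ _ h
      intro s e hs
      dsimp only
      split
      · exact PySem.Set.nodup_add _ _ hs
      · exact hs
  exact houter (PySem.Set.empty, 0) (by simp [PySem.Set.empty])

-- A's parse equals the enumerate-style fold (literal equality)
theorem pv_parse_inner (cs : List Char) (y : Int) (s : PySem.Set (Int × Int)) :
    (PySem.List.pyRange 0 cs.length 1).foldl
        (fun s x => if PySem.List.pyGetD cs x ' ' == '#' then PySem.Set.add s (x, y) else s) s
      = (PySem.List.enumerate cs 0).foldl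
          (fun s xc => if xc.2 == '#' then PySem.Set.add s (xc.1, y) else s) s := by
  rw [PySem.List.enumerate_eq_map_pyRange cs ' ', List.foldl_map]
  simp [PySem.List.len_eq]

theorem pv_parse_outer (pi : List String) (st : Int) (s : PySem.Set (Int × Int)) :
    (pi.foldl (fun (acc : PySem.Set (Int × Int) × Int) row =>
        ((PySem.List.pyRange 0 row.toList.length 1).foldl
          (fun s x => if PySem.List.pyGetD row.toList x ' ' == '#'
                      then PySem.Set.add s (x, acc.2) else s) acc.1,
         acc.2 - 1)) (s, -st)).1
      = (PySem.List.enumerate pi st).foldl (fun s yr =>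
          (PySem.List.enumerate yr.2.toList 0).foldl (fun s xc =>
            if xc.2 == '#' then PySem.Set.add s (xc.1, -yr.1) else s) s) s := by
  induction pi generalizing st s with
  | nil => simp [PySem.List.enumerate_nil]
  | cons row rest ih =>
    rw [PySem.List.enumerate_cons]
    simp only [List.foldl_cons]
    have harith : -st - 1 = -(st + 1) := by ring
    rw [harith, ih (st + 1)]
    rw [pv_parse_inner row.toList (-st) s]

theorem part2_parse_eq (pi : List String) :
    pvParseA pi =
      (PySem.List.enumerate pi 0).foldl (fun s yr =>
        (PySem.List.enumerate yr.2.toList 0).foldl (fun s xc =>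
          if xc.2 == '#' then PySem.Set.add s (xc.1, -yr.1) else s) s)
      PySem.Set.empty := by
  unfold pvParseA
  have h := pv_parse_outer pi 0 PySem.Set.empty
  simpa using h

-- membership through the nested conditional-add fold
theorem pv_mem_nested_fold {A B C : Type} [BEq C] [LawfulBEq C] (l : List A)
    (g : A → List B) (q : B → Bool) (f : A → B → C) (s : PySem.Set C) (x : C) :
    x ∈ l.foldl (fun s yr => (g yr).foldl
        (fun s xc => if q xc then PySem.Set.add s (f yr xc) else s) s) s
      ↔ x ∈ s ∨ ∃ yr ∈ l, ∃ xc ∈ g yr, q xc = true ∧ f yr xc = x := by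
  induction l generalizing s with
  | nil => simp
  | cons yr l ih =>
    simp only [List.foldl_cons]
    rw [ih, pv_mem_foldl_if_add]
    constructor
    · rintro ((h | h) | ⟨yr', hyr', h⟩)
      · exact Or.inl h
      · exact Or.inr ⟨yr, List.mem_cons_self .., h⟩
      · exact Or.inr ⟨yr', List.mem_cons_of_mem _ hyr', h⟩
    · rintro (h | ⟨yr', hyr', h⟩)
      · exact Or.inl (Or.inl h)
      · rcases List.mem_cons.mp hyr' with rfl | hyr''
        · exact Or.inl (Or.inr h)
        · exact Or.inr ⟨yr', hyr'', h⟩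

-- membership in B's comprehension
theorem pv_mem_comp {A B C : Type} [BEq C] [LawfulBEq C] (l : List A)
    (g : A → List B) (q : B → Bool) (f : A → B → C) (x : C) :
    x ∈ PySem.Set.ofList (l.flatMap (fun yr => ((g yr).filter q).map (f yr)))
      ↔ ∃ yr ∈ l, ∃ xc ∈ g yr, q xc = true ∧ f yr xc = x := by
  rw [PySem.Set.mem_ofList, List.mem_flatMap]
  constructor
  · rintro ⟨yr, hyr, hx⟩
    obtain ⟨xc, hxc, hfx⟩ := List.mem_map.mp hx
    obtain ⟨hxc1, hxc2⟩ := List.mem_filter.mp hxc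
    exact ⟨yr, hyr, xc, hxc1, hxc2, hfx⟩
  · rintro ⟨yr, hyr, xc, hxc, hq, hfx⟩
    exact ⟨yr, hyr, List.mem_map.mpr ⟨xc, List.mem_filter.mpr ⟨hxc, hq⟩, hfx⟩⟩

-- the two parses agree up to membership
theorem pv_mem_parse (pi : List String) (x : Int × Int) :
    x ∈ pvParseA pi
      ↔ x ∈ PySem.Set.ofList ((PySem.List.enumerate pi 0).flatMap (fun yr =>
          ((PySem.List.enumerate yr.2.toList 0).filter (fun xc => xc.2 == '#')).map
            (fun xc => (xc.1, -yr.1)))) := by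
  rw [part2_parse_eq, pv_mem_nested_fold (PySem.List.enumerate pi 0)
      (fun yr => PySem.List.enumerate yr.2.toList 0) (fun xc => xc.2 == '#')
      (fun yr xc => (xc.1, -yr.1)) PySem.Set.empty x,
    pv_mem_comp (PySem.List.enumerate pi 0)
      (fun yr => PySem.List.enumerate yr.2.toList 0) (fun xc => xc.2 == '#')
      (fun yr xc => (xc.1, -yr.1)) x]
  simp [PySem.Set.empty]

-- ===== VERDICT (by name: the statement is the Claim_ definition above) =====
theorem part2_spec : Claim_equal_part2 := by
  intro pi _
  unfold Spec_part2 part2 part2_alt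
  apply pv_loop_eq
  · exact pv_nodup_parse pi
  · exact PySem.Set.nodup_ofList _
  · intro x
    exact pv_mem_parse pi x
  · decide
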